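-- pv_equiv track=rewrite | github.com/pgimenes/aries | src/tasks/common.py | _common_tot_schedule
-- ===== SOURCE A (Python) =====
-- def _common_tot_schedule(
--         width: int,
--         depth: int,
--         generate_action: str = "generate",
--         refine_action: str = "refine",
-- ) -> int:
--     actions = []
--     action_nodes = []
--     branch_heads = []
--     last_node = 0
--
--     # Sorting
--     actions += [generate_action]
--     action_nodes += [["0"] * width]
--     last_node += width
--
--     # Score
--     score_nodes = [str(i) for i in range(1, width + 1)]
--     actions += ["score"]
--     action_nodes += [score_nodes]
--
--     # Keep best
--     actions += ["keepbest"]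
--     action_nodes += [[str(i) for i in range(1, width + 1)]]
--     last_node += 1
--     branch_heads.append(str(last_node))
--
--     for i in range(depth - 1):
--         # Refine
--         refine_node = last_node
--         actions += [refine_action]
--         action_nodes += [[str(refine_node)] * width]
--         last_node += width
--
--         # Score
--         score_nodes = [str(j) for j in range(last_node - width + 1, last_node + 1)]
--         actions += ["score"]
--         action_nodes += [score_nodes]
--
--         # Keep best
--         actions += ["keepbest"]
--         action_nodes += [[str(j) for j in range(last_node - width + 1, last_node + 1)]]
--         last_node += 1
--         branch_heads.append(str(last_node))
--
--     # Keep best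
--     actions += ["keepbest"]
--     action_nodes += [branch_heads]
--     last_node += 1
--
--     # Ground truth
--     actions += ["groundtruth"]
--     action_nodes += [[str(last_node)]]
--     last_node += 1
--     return actions, action_nodes
-- ===== SOURCE B (Python) =====
-- def _common_tot_schedule(
--         width: int,
--         depth: int,
--         generate_action: str = "generate",
--         refine_action: str = "refine",
-- ) -> int:
--     # Table formulation: every output slot is computed independently from its
--     # position i via divmod, with no running state; the two lists are the unzip
--     # of one positional map.
--     step = width + 1
--     blocks = max(1, depth)
--     n = 3 * blocks + 2
--
--     def entry(i):
--         if i == n - 2: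
--             return "keepbest", [str((j + 1) * step) for j in range(blocks)]
--         if i == n - 1:
--             return "groundtruth", [str(blocks * step + 1)]
--         k, r = divmod(i, 3)
--         base = k * step
--         if r == 0:
--             return (generate_action if k == 0 else refine_action,
--                     ["0" if k == 0 else str(base)] * width)
--         return (("score" if r == 1 else "keepbest"),
--                 [str(base + j) for j in range(1, width + 1)])
--
--     pairs = [entry(i) for i in range(n)]
--     return [a for a, _ in pairs], [ns for _, ns in pairs]
-- ===== Notes on version B (the rewrite author's own statement) =====
-- stated objective: alternative
-- what changed: Replaces A's stateful sequential emitter (running last_node counter, peeled first block, branch_heads accumulator) with a stateless table formulation: one position->entry function computed by divmod on the slot index, mapped over range(3*max(1,depth)+2) and unzipped into the two lists.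
import Mathlib
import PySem

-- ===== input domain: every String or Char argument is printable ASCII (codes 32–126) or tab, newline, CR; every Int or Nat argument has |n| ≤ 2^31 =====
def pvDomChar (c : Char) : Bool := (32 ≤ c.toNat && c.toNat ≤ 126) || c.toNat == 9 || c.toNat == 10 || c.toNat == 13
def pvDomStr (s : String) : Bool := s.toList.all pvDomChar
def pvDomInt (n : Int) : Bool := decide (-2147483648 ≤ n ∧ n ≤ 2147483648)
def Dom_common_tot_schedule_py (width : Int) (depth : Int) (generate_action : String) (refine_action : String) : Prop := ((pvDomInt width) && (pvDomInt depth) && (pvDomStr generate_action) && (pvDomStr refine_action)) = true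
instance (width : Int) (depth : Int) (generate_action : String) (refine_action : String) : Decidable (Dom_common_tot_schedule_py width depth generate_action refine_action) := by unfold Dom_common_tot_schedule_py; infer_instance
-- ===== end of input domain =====

-- B replaces A's stateful sequential emitter (running last_node counter, peeled first block,
-- branch_heads accumulator) with a stateless table: a position->entry function computed by divmod
-- on the slot index, mapped over all slot positions and unzipped into the two result lists.

-- ===== PORT A =====
-- loop body of A's 'for i in range(depth - 1)' (state: actions, action_nodes, branch_heads, last_node)
def pvALoopBody (width : Int) (refine_action : String)
    (st : List String × List (List String) × List String × Int) (_ : Int) :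
    List String × List (List String) × List String × Int :=
  let actions := st.1
  let action_nodes := st.2.1
  let branch_heads := st.2.2.1
  let last_node := st.2.2.2
  -- Refine
  let refine_node := last_node
  let actions := actions ++ [refine_action]
  let action_nodes := action_nodes ++ [PySem.List.pyRepeat [PySem.Int.toStr refine_node] width]
  let last_node := last_node + width
  -- Score
  let score_nodes := (PySem.List.pyRange (last_node - width + 1) (last_node + 1) 1).map PySem.Int.toStr
  let actions := actions ++ ["score"]
  let action_nodes := action_nodes ++ [score_nodes]
  -- Keep best
  let actions := actions ++ ["keepbest"]
  let action_nodes := action_nodes ++ [(PySem.List.pyRange (last_node - width + 1) (last_node + 1) 1).map PySem.Int.toStr]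
  let last_node := last_node + 1
  let branch_heads := branch_heads ++ [PySem.Int.toStr last_node]
  (actions, action_nodes, branch_heads, last_node)

def common_tot_schedule_py (width : Int) (depth : Int) (generate_action : String) (refine_action : String) : List String × List (List String) :=
  let actions : List String := []
  let action_nodes : List (List String) := []
  let branch_heads : List String := []
  let last_node : Int := 0
  -- Sorting
  let actions := actions ++ [generate_action]
  let action_nodes := action_nodes ++ [PySem.List.pyRepeat ["0"] width]
  let last_node := last_node + width
  -- Score
  let score_nodes := (PySem.List.pyRange 1 (width + 1) 1).map PySem.Int.toStr
  let actions := actions ++ ["score"]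
  let action_nodes := action_nodes ++ [score_nodes]
  -- Keep best
  let actions := actions ++ ["keepbest"]
  let action_nodes := action_nodes ++ [(PySem.List.pyRange 1 (width + 1) 1).map PySem.Int.toStr]
  let last_node := last_node + 1
  let branch_heads := branch_heads ++ [PySem.Int.toStr last_node]
  let st := (PySem.List.pyRange 0 (depth - 1) 1).foldl (pvALoopBody width refine_action)
    (actions, action_nodes, branch_heads, last_node)
  let actions := st.1
  let action_nodes := st.2.1
  let branch_heads := st.2.2.1
  let last_node := st.2.2.2
  -- Keep best
  let actions := actions ++ ["keepbest"]
  let action_nodes := action_nodes ++ [branch_heads]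
  let last_node := last_node + 1
  -- Ground truth
  let actions := actions ++ ["groundtruth"]
  let action_nodes := action_nodes ++ [[PySem.Int.toStr last_node]]
  (actions, action_nodes)

-- ===== PORT B =====
-- B's inner 'entry(i)': the schedule entry at slot i, computed from i alone by divmod
def pvEntry (width : Int) (blocks : Int) (generate_action refine_action : String) (i : Int) :
    String × List String :=
  let n : Int := 3 * blocks + 2
  if i == n - 2 then
    ("keepbest", (PySem.List.pyRange 0 blocks 1).map (fun j => PySem.Int.toStr ((j + 1) * (width + 1))))
  else if i == n - 1 then
    ("groundtruth", [PySem.Int.toStr (blocks * (width + 1) + 1)])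
  else
    let k := PySem.Int.floordiv i 3
    let r := PySem.Int.mod i 3
    let base := k * (width + 1)
    if r == 0 then
      ((if k == 0 then generate_action else refine_action),
       PySem.List.pyRepeat [if k == 0 then "0" else PySem.Int.toStr base] width)
    else
      ((if r == 1 then "score" else "keepbest"),
       (PySem.List.pyRange 1 (width + 1) 1).map (fun j => PySem.Int.toStr (base + j)))

def common_tot_schedule_py_alt (width : Int) (depth : Int) (generate_action : String) (refine_action : String) : List String × List (List String) :=
  let blocks : Int := max 1 depth
  let n : Int := 3 * blocks + 2
  let pairs := (PySem.List.pyRange 0 n 1).map (pvEntry width blocks generate_action refine_action)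
  (pairs.map Prod.fst, pairs.map Prod.snd)

-- ===== PRECONDITION & SPEC =====
def Spec_common_tot_schedule_py (width : Int) (depth : Int) (generate_action : String) (refine_action : String) (out : List String × List (List String)) : Prop := out = common_tot_schedule_py_alt width depth generate_action refine_action
instance (width : Int) (depth : Int) (generate_action : String) (refine_action : String) (out : List String × List (List String)) : Decidable (Spec_common_tot_schedule_py width depth generate_action refine_action out) := by unfold Spec_common_tot_schedule_py; infer_instance

-- ===== CLAIM (what is proved, stated in full; the proofs are below) =====
def Claim_equal_common_tot_schedule_py : Prop := ∀ (width : Int) (depth : Int) (generate_action : String) (refine_action : String), Dom_common_tot_schedule_py width depth generate_action refine_action → Spec_common_tot_schedule_py width depth generate_action refine_action (common_tot_schedule_py width depth generate_action refine_action)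

-- ===== LEMMAS AND PROOFS =====

-- the score/keepbest node list of the level whose refine base is `base`, in B's shape
def pvSc (width base : Int) : List String :=
  (PySem.List.pyRange 1 (width + 1) 1).map (fun j => PySem.Int.toStr (base + j))

-- A's shape of the same list coincides with B's
lemma pvSc_shift (width base : Int) :
    (PySem.List.pyRange (base + 1) (base + width + 1) 1).map PySem.Int.toStr = pvSc width base := by
  simp only [pvSc, PySem.List.pyRange_one, List.map_map]
  have h : base + width + 1 - (base + 1) = width + 1 - 1 := by ring
  rw [h]
  exact List.map_congr_left fun a _ => by simp [Function.comp]; ring_nf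

-- the three node lists of level m (m ≥ 1 on A's side)
def pvBlk (width m : Int) : List (List String) :=
  [PySem.List.pyRepeat [PySem.Int.toStr (m * (width + 1))] width,
   pvSc width (m * (width + 1)), pvSc width (m * (width + 1))]

lemma pvRange_toNat (c : Int) :
    PySem.List.pyRange 0 c 1 = PySem.List.pyRange 0 ((c.toNat : Int)) 1 := by
  simp [PySem.List.pyRange_one]
  congr 2
  omega

lemma pvALoop (width i : Int) (r : String) (acts : List String) (nodes : List (List String))
    (heads : List String) : ∀ (n : Nat) (last : Int), last = (i + 1) * (width + 1) →
    (PySem.List.pyRange 0 (n : Int) 1).foldl (pvALoopBody width r) (acts, nodes, heads, last) =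
    (acts ++ (List.range n).flatMap (fun _ => [r, "score", "keepbest"]),
     nodes ++ (List.range n).flatMap (fun j => pvBlk width (i + 1 + (j : Int))),
     heads ++ (List.range n).map (fun j => PySem.Int.toStr ((i + 2 + (j : Int)) * (width + 1))),
     (i + 1 + (n : Int)) * (width + 1)) := by
  intro n
  induction n with
  | zero => intro last h; simp [h]
  | succ n ih =>
    intro last h
    have hcast : (((n + 1 : Nat)) : Int) = (n : Int) + 1 := by push_cast; ring
    rw [hcast, PySem.List.pyRange_one_succ_right (by positivity), List.foldl_append, ih last h]
    simp only [List.foldl_cons, List.foldl_nil, pvALoopBody, pvBlk,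
      List.range_succ, List.flatMap_append, List.flatMap_cons,
      List.flatMap_nil, List.append_nil, List.append_assoc]
    refine Prod.ext ?_ (Prod.ext ?_ (Prod.ext ?_ ?_)) <;>
      simp [← pvSc_shift] <;> ring_nf

-- pvEntry evaluated at the three slots of level k (0 ≤ k < blocks)
lemma pvEntry_block (width blocks : Int) (g r : String) (k : Int)
    (hk : k < blocks) :
    [pvEntry width blocks g r (3 * k), pvEntry width blocks g r (3 * k + 1),
     pvEntry width blocks g r (3 * k + 2)] =
    [((if k == 0 then g else r),
      PySem.List.pyRepeat [if k == 0 then "0" else PySem.Int.toStr (k * (width + 1))] width),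
     ("score", pvSc width (k * (width + 1))),
     ("keepbest", pvSc width (k * (width + 1)))] := by
  have hd0 : PySem.Int.floordiv (3 * k) 3 = k := by
    rw [PySem.Int.floordiv_eq_iff_of_pos (by omega)]; omega
  have hd1 : PySem.Int.floordiv (3 * k + 1) 3 = k := by
    rw [PySem.Int.floordiv_eq_iff_of_pos (by omega)]; omega
  have hd2 : PySem.Int.floordiv (3 * k + 2) 3 = k := by
    rw [PySem.Int.floordiv_eq_iff_of_pos (by omega)]; omega
  have hm0 := PySem.Int.floordiv_mul_add_mod (3 * k) 3
  have hm1 := PySem.Int.floordiv_mul_add_mod (3 * k + 1) 3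
  have hm2 := PySem.Int.floordiv_mul_add_mod (3 * k + 2) 3
  rw [hd0] at hm0; rw [hd1] at hm1; rw [hd2] at hm2
  have hm0' : PySem.Int.mod (3 * k) 3 = 0 := by omega
  have hm1' : PySem.Int.mod (3 * k + 1) 3 = 1 := by omega
  have hm2' : PySem.Int.mod (3 * k + 2) 3 = 2 := by omega
  simp only [pvEntry, beq_iff_eq, hd0, hd1, hd2, hm0', hm1', hm2', pvSc]
  simp only [if_neg (show ¬(3 * k = 3 * blocks + 2 - 2) by omega),
    if_neg (show ¬(3 * k = 3 * blocks + 2 - 1) by omega),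
    if_neg (show ¬(3 * k + 1 = 3 * blocks + 2 - 2) by omega),
    if_neg (show ¬(3 * k + 1 = 3 * blocks + 2 - 1) by omega),
    if_neg (show ¬(3 * k + 2 = 3 * blocks + 2 - 2) by omega),
    if_neg (show ¬(3 * k + 2 = 3 * blocks + 2 - 1) by omega)]
  norm_num

-- B's map over the first 3*b slots, spelled as per-level triples
lemma pvBMap (width blocks : Int) (g r : String) : ∀ (b : Nat), (b : Int) ≤ blocks →
    (PySem.List.pyRange 0 (3 * (b : Int)) 1).map (pvEntry width blocks g r) =
    (List.range b).flatMap (fun (k : Nat) =>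
      [((if (k : Int) == 0 then g else r),
        PySem.List.pyRepeat [if (k : Int) == 0 then "0" else PySem.Int.toStr ((k : Int) * (width + 1))] width),
       ("score", pvSc width ((k : Int) * (width + 1))),
       ("keepbest", pvSc width ((k : Int) * (width + 1)))]) := by
  intro b
  induction b with
  | zero => intro _; simp
  | succ n ih =>
    intro hle
    have hc : (((n + 1 : Nat)) : Int) = (n : Int) + 1 := by push_cast; ring
    rw [hc] at hle ⊢
    have hsplit : PySem.List.pyRange 0 (3 * ((n : Int) + 1)) 1 =
        PySem.List.pyRange 0 (3 * (n : Int)) 1 ++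
        [3 * (n : Int), 3 * (n : Int) + 1, 3 * (n : Int) + 2] := by
      rw [PySem.List.pyRange_one_append 0 (3 * (n : Int)) (3 * ((n : Int) + 1)) (by positivity) (by omega)]
      congr 1
      rw [PySem.List.pyRange_one_cons (by omega), PySem.List.pyRange_one_cons (by omega),
          PySem.List.pyRange_one_cons (by omega), PySem.List.pyRange_one_eq_nil (by omega)]
      simp; omega
    rw [hsplit, List.map_append, ih (by omega), List.range_succ, List.flatMap_append]
    congr 1
    simp only [List.flatMap_cons, List.flatMap_nil, List.append_nil, List.map_cons, List.map_nil]
    have := pvEntry_block width blocks g r (n : Int) (by omega)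
    simpa using this

-- ===== VERDICT (by name: the statement is the Claim_ definition above) =====
lemma pvCast (m : Nat) :
    (List.range m).flatMap (fun (a : Nat) => [(a : Int)]) = (List.range m).map (fun (a : Nat) => (a : Int)) := by
  induction m with
  | zero => rfl
  | succ n ih => rw [List.range_succ, List.flatMap_append, List.map_append, ih]; rfl

theorem common_tot_schedule_py_spec : Claim_equal_common_tot_schedule_py := by
  intro width depth g r _
  unfold Spec_common_tot_schedule_py
  have hb : max 1 depth = (((depth - 1).toNat : Int)) + 1 := by omega
  simp only [common_tot_schedule_py, common_tot_schedule_py_alt, hb,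
    pvRange_toNat (depth - 1)]
  rw [pvALoop width 0 r _ _ _ (depth - 1).toNat _ (by ring)]
  generalize (depth - 1).toNat = m
  have hsplit : PySem.List.pyRange 0 (3 * (((m : Int)) + 1) + 2) 1 =
      PySem.List.pyRange 0 (3 * (((m + 1 : Nat)) : Int)) 1 ++
      [3 * ((m : Int) + 1), 3 * ((m : Int) + 1) + 1] := by
    push_cast
    rw [PySem.List.pyRange_one_append 0 (3 * ((m : Int) + 1)) (3 * ((m : Int) + 1) + 2) (by positivity) (by omega)]
    congr 1
    rw [PySem.List.pyRange_one_cons (by omega), PySem.List.pyRange_one_cons (by omega),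
        PySem.List.pyRange_one_eq_nil (by omega)]
  have htail0 : pvEntry width ((m : Int) + 1) g r (3 * ((m : Int) + 1)) =
      ("keepbest", (PySem.List.pyRange 0 ((m : Int) + 1) 1).map
        (fun j => PySem.Int.toStr ((j + 1) * (width + 1)))) := by
    simp only [pvEntry]
    rw [if_pos (show ((3 * ((m : Int) + 1) == 3 * ((m : Int) + 1) + 2 - 2)) = true by simp only [beq_iff_eq]; omega)]
  have htail1 : pvEntry width ((m : Int) + 1) g r (3 * ((m : Int) + 1) + 1) =
      ("groundtruth", [PySem.Int.toStr (((m : Int) + 1) * (width + 1) + 1)]) := by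
    simp only [pvEntry, beq_iff_eq]
    rw [if_neg (by omega), if_pos (by omega)]
  rw [hsplit, List.map_append, pvBMap width ((m : Int) + 1) g r (m + 1) (by push_cast; omega)]
  simp only [List.map_cons, List.map_nil, htail0, htail1, List.range_succ_eq_map,
    List.flatMap_cons, List.flatMap_map, List.map_append, List.map_flatMap]
  refine Prod.ext ?_ ?_
  · dsimp only
    simp [List.append_assoc]
    refine List.flatMap_congr fun a _ => ?_
    rw [if_neg (by omega)]
  · dsimp only
    simp [List.append_assoc, pvBlk, pvSc]
    congr 1
    · rw [pvCast m, List.flatMap_map]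
      refine List.flatMap_congr fun a _ => ?_
      rw [if_neg (by omega), show (1 : ℤ) + (a : Int) = (a : Int) + 1 from add_comm 1 ((a : Nat) : Int)]
    · congr 1
      · rw [PySem.List.pyRange_one_cons (by omega), List.map_cons]
        congr 1
        · norm_num
        · rw [pvCast m, List.map_map, PySem.List.pyRange_one]
          have h1 : ((↑m : ℤ) + 1 - (0 + 1)).toNat = m := by omega
          rw [h1]
          simp only [List.map_map]
          refine List.map_congr_left fun a _ => ?_
          simp only [Function.comp_apply]
          congr 1
          ring
      · congr 3
        ring
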